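-- pv_equiv track=rewrite | github.com/FabBodson/Bac1 | Programmation_Orientee_Objet/LabosPOO/Labo1/Exo01/exo01.py | sum_of_terms
-- ===== SOURCE A (Python) =====
-- def sum_of_terms(pos):
--     """
--     Fonction qui retourne la somme des entiers de la ligne de position pos où pos commence à 0.
--             Si pos est une valeur négative, la fonction retourne 0.
--     :param: pos: int, position de la ligne dont on veut la somme des entiers contenus dedans.
--     :return: 0 si valeur négative, la somme autrement.
--     """
--
--     if pos < 0:
--         return 0
--
--     elif pos > 0:
--         colonne = 1
--         somme = (pos + 1) * pos + 1
--         somme_2 = somme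
--
--         while colonne <= pos:
--             somme_2 = somme_2 + 2
--             somme = somme + somme_2
--             colonne += 1
--
--     else:
--         somme = 2 * pos + 1
--
--     return somme
-- ===== SOURCE B (Python) =====
-- def sum_of_terms(pos):
--     """Sum of the integers in row pos (0 for negative pos): closed form (pos+1)**3."""
--     if pos < 0:
--         return 0
--     return (pos + 1) ** 3
-- ===== Notes on version B (the rewrite author's own statement) =====
-- stated objective: faster
-- what changed: Replaced the O(pos) while-loop accumulation of consecutive odd numbers by the closed-form cube (pos+1)**3.
import Mathlib
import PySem

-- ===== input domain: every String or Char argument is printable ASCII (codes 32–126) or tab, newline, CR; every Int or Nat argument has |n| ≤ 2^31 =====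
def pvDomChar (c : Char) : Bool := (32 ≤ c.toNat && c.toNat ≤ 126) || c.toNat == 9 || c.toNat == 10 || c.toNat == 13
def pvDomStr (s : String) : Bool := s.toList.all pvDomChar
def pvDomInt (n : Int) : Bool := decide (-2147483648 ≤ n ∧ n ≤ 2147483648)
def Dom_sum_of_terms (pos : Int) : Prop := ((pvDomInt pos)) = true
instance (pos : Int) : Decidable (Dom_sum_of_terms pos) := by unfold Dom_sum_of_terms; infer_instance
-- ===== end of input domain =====

-- B replaces A's O(pos) while-loop summation of consecutive odd numbers by the closed form (pos+1)^3 (objective: faster).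

-- ===== PORT A =====
-- the while-loop: runs (pos - colonne + 1) times; fuel = remaining iterations
def sum_of_terms_loop (somme somme_2 : Int) : Nat → Int
  | 0 => somme
  | n + 1 => sum_of_terms_loop (somme + (somme_2 + 2)) (somme_2 + 2) n

def sum_of_terms (pos : Int) : Int :=
  if pos < 0 then 0
  else if pos > 0 then
    sum_of_terms_loop ((pos + 1) * pos + 1) ((pos + 1) * pos + 1) pos.toNat
  else 2 * pos + 1

-- ===== PORT B =====
def sum_of_terms_alt (pos : Int) : Int :=
  if pos < 0 then 0 else (pos + 1) ^ 3

-- ===== PRECONDITION & SPEC =====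
def Spec_sum_of_terms (pos : Int) (out : Int) : Prop := out = sum_of_terms_alt pos
instance (pos : Int) (out : Int) : Decidable (Spec_sum_of_terms pos out) := by unfold Spec_sum_of_terms; infer_instance

-- ===== CLAIM (what is proved, stated in full; the proofs are below) =====
def Claim_equal_sum_of_terms : Prop := ∀ (pos : Int), Dom_sum_of_terms pos → Spec_sum_of_terms pos (sum_of_terms pos)

-- ===== LEMMAS AND PROOFS =====
-- each iteration adds somme_2 + 2k; closed form of the loop
theorem sum_of_terms_loop_eq (n : Nat) : ∀ (s s2 : Int),
    sum_of_terms_loop s s2 n = s + n * s2 + n * (n + 1) := by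
  induction n with
  | zero => intro s s2; simp [sum_of_terms_loop]
  | succ m ih =>
      intro s s2
      rw [sum_of_terms_loop, ih]
      push_cast
      ring

-- ===== VERDICT (by name: the statement is the Claim_ definition above) =====
theorem sum_of_terms_spec : Claim_equal_sum_of_terms := by
  intro pos _
  unfold Spec_sum_of_terms sum_of_terms sum_of_terms_alt
  split_ifs with h1 h2
  · rfl
  · rw [sum_of_terms_loop_eq]
    have hc : (pos.toNat : Int) = pos := Int.toNat_of_nonneg (le_of_lt h2)
    rw [hc]; ring
  · have : pos = 0 := by omega
    subst this; norm_num
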